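-- pv_equiv track=rewrite | github.com/pypi-data/pypi-mirror-202 | packages/validate-pypi-name/validate_pypi_name-1.0.4-py3-none-any.whl/validate_pypi_name/validator.py | variate
-- ===== SOURCE A (Python) =====
-- def variate(original_string, char):
--     lst = []
--     items = [char for char in original_string]
--     bits  = len(items) - 1
--
--     for n in range(1, int(2**bits)):
--         lst.append(''.join(items[i] + (char if n & (1<<i) else '') for i in range(bits)) + items[-1])
--
--
--     realLst = []
--     for word in lst:
--         if (word.count(char) < 2):
--             realLst.append(word)
--     return realLst
-- ===== SOURCE B (Python) =====
-- def variate(original_string, char):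
--     # Only single-insertion variants can survive the count filter: a word built
--     # with k >= 2 inserted copies of char contains char at least twice and is
--     # always dropped.  So enumerate the len-1 insertion gaps directly.
--     result = []
--     for i in range(len(original_string) - 1):
--         word = original_string[:i + 1] + char + original_string[i + 1:]
--         if word.count(char) < 2:
--             result.append(word)
--     return result
-- ===== Notes on version B (the rewrite author's own statement) =====
-- stated objective: faster
-- what changed: A enumerates all 2^(n-1) bitmask insertion patterns and then filters; B enumerates only the n-1 single-gap insertions, since every multi-insertion word necessarily contains char at least twice and is filtered out by A anyway.
import Mathlib
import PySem

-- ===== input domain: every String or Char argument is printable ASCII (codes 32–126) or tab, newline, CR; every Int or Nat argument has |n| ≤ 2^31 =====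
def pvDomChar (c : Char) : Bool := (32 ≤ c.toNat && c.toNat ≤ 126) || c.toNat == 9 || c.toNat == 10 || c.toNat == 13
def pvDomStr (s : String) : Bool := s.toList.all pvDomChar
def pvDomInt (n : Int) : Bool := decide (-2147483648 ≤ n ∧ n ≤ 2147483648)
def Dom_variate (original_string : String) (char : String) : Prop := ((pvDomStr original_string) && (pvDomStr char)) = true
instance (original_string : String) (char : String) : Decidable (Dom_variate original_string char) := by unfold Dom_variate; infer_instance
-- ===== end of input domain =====

-- B enumerates only the len-1 single-gap insertions instead of A's 2^(len-1) bitmask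
-- patterns (every multi-insertion word contains char at least twice, so A's filter
-- drops it anyway); objective: faster.

-- ===== PORT A =====
def variate (original_string : String) (char : String) : List String :=
  let items : List (List Char) := original_string.toList.map (fun ch => [ch])
  let bits : Int := PySem.List.len items - 1
  -- int(2**bits): bits = -1 only for the empty string, where int(2**-1) = int(0.5) = 0; exact for bits ≥ 0
  let upper : Int := if bits < 0 then 0 else 2 ^ bits.toNat
  let lst : List (List Char) :=
    (PySem.List.pyRange 1 upper 1).foldl (fun acc n =>
      acc ++ [PySem.Chars.join []
        ((PySem.List.pyRange 0 bits 1).map (fun i =>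
          PySem.List.pyGetD items i [] ++
            (if PySem.Int.band n ((1:Int) <<< i.toNat) ≠ 0 then char.toList else [])))
        ++ PySem.List.pyGetD items (-1) []]) []
  let realLst : List (List Char) :=
    lst.foldl (fun acc word =>
      if PySem.Chars.count word char.toList < 2 then acc ++ [word] else acc) []
  realLst.map (fun w => String.ofList w)

-- ===== PORT B =====
def variate_alt (original_string : String) (char : String) : List String :=
  let s : List Char := original_string.toList
  let result : List (List Char) :=
    (PySem.List.pyRange 0 (PySem.List.len s - 1) 1).foldl (fun acc i =>
      let word := PySem.List.slice s none (some (i+1)) ++ char.toList ++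
                  PySem.List.slice s (some (i+1)) none
      if PySem.Chars.count word char.toList < 2 then acc ++ [word] else acc) []
  result.map (fun w => String.ofList w)

-- ===== PRECONDITION & SPEC =====
def Spec_variate (original_string : String) (char : String) (out : List String) : Prop := out = variate_alt original_string char
instance (original_string : String) (char : String) (out : List String) : Decidable (Spec_variate original_string char out) := by unfold Spec_variate; infer_instance

-- ===== CLAIM (what is proved, stated in full; the proofs are below) =====
def Claim_equal_variate : Prop := ∀ (original_string : String) (char : String), Dom_variate original_string char → Spec_variate original_string char (variate original_string char)

-- ===== LEMMAS AND PROOFS =====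

def pvWordA (s c : List Char) (n : Int) : List Char :=
  PySem.Chars.join [] ((PySem.List.pyRange 0 ((s.length : Int) - 1) 1).map (fun i =>
    PySem.List.pyGetD (s.map (fun ch => [ch])) i [] ++
      (if PySem.Int.band n ((1:Int) <<< i.toNat) ≠ 0 then c else []))) ++
  PySem.List.pyGetD (s.map (fun ch => [ch])) (-1) []

def pvWordB (s c : List Char) (i : Int) : List Char :=
  PySem.List.slice s none (some (i+1)) ++ c ++ PySem.List.slice s (some (i+1)) none

def pvPred (c : List Char) (w : List Char) : Bool := decide (PySem.Chars.count w c < 2)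

lemma pv_join_nil_flatten (l : List (List Char)) : PySem.Chars.join [] l = l.flatten := by
  induction l with
  | nil => simp [PySem.Chars.join_nil]
  | cons p rest ih =>
    cases rest with
    | nil => simp [PySem.Chars.join_singleton]
    | cons q r => rw [PySem.Chars.join_cons_cons, List.flatten_cons, ih]; simp

lemma pv_shift (j : Nat) : ((1:Int) <<< j) = ((2^j : Nat) : Int) := by
  simp [Int.shiftLeft_eq]

lemma pv_band_iff (m j : Nat) :
    (PySem.Int.band (m : Int) ((1:Int) <<< j) ≠ 0) ↔ m.testBit j = true := by
  rw [pv_shift, PySem.Int.band_natCast]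
  rw [Nat.and_two_pow]
  cases h : m.testBit j
  · simp [h]
  · simp [h]

-- A's word for mask m, written over Nat indices
lemma pv_wordA_eq (s c : List Char) (hs : s ≠ []) (m : Nat) :
    pvWordA s c (m : Int) =
      ((List.range (s.length - 1)).map (fun j =>
        (s.map (fun ch => [ch])).getD j [] ++ (if m.testBit j then c else []))).flatten
      ++ [s.getLast hs] := by
  have hL : 1 ≤ s.length := List.length_pos_iff.mpr hs
  have hcast : ((s.length : Int) - 1) = ((s.length - 1 : Nat) : Int) := by omega
  unfold pvWordA
  rw [hcast, PySem.List.pyRange_zero_natCast, List.map_map, pv_join_nil_flatten]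
  congr 1
  · congr 1
    apply List.map_congr_left
    intro j hj
    simp only [Function.comp_apply, PySem.List.pyGetD_natCast, Int.toNat_natCast]
    congr 1
    by_cases h : m.testBit j
    · rw [if_pos ((pv_band_iff m j).mpr h), if_pos h]
    · rw [if_neg (fun hc => h ((pv_band_iff m j).mp hc)), if_neg h]
  · have hmne : s.map (fun ch => [ch]) ≠ [] := by simpa using hs
    rw [PySem.List.pyGetD_neg_one _ _ hmne]
    rw [List.getLast_eq_getElem hmne, List.getLast_eq_getElem hs]
    simp [List.getElem_map]

lemma pv_flatten_split (f : Nat → List Char) (N j : Nat) (h : j < N) :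
    ((List.range N).map f).flatten =
      ((List.range j).map f).flatten ++ f j ++
      ((List.range (N - j - 1)).map (fun t => f (j+1+t))).flatten := by
  have hN : N = (j + 1) + (N - j - 1) := by omega
  conv_lhs => rw [hN, List.range_add, List.range_succ]
  simp [List.map_map, Function.comp_def]

lemma pv_flatten_chunk (s : List Char) (a : Nat) :
    ∀ k, a + k ≤ s.length →
    ((List.range k).map (fun t => (s.map (fun ch => [ch])).getD (a+t) [])).flatten
      = (s.drop a).take k := by
  intro k
  induction k with
  | zero => simp
  | succ k ih =>
    intro hk
    rw [List.range_succ, List.map_append, List.flatten_append, ih (by omega)]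
    have ha : a + k < s.length := by omega
    have hd : k < (s.drop a).length := by simp; omega
    rw [List.take_add_one]
    simp only [List.map_cons, List.map_nil, List.flatten_cons, List.flatten_nil, List.append_nil]
    congr 1
    rw [List.getD_eq_getElem _ _ (by simpa using ha), List.getElem_map]
    rw [List.getElem?_eq_getElem hd, List.getElem_drop]
    simp

-- single-bit mask 2^i gives exactly B's word for gap i
lemma pv_single (s c : List Char) (hs2 : 2 ≤ s.length) (i : Nat) (hi : i < s.length - 1) :
    pvWordA s c ((2:Int)^i) = pvWordB s c (i : Int) := by
  have hs : s ≠ [] := by intro h; subst h; simp at hs2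
  have hcast : ((2:Int)^i) = ((2^i : Nat) : Int) := by push_cast; ring
  rw [hcast, pv_wordA_eq s c hs]
  rw [pv_flatten_split _ _ i hi]
  have htb : ∀ j, (2^i : Nat).testBit j = decide (i = j) := fun j => Nat.testBit_two_pow
  -- prefix chunk: indices j < i, bit off
  have hpre : ((List.range i).map (fun j =>
      (s.map (fun ch => [ch])).getD j [] ++ (if (2^i : Nat).testBit j then c else []))).flatten
      = List.take i s := by
    have := pv_flatten_chunk s 0 i (by omega)
    simp only [List.drop_zero, Nat.zero_add] at this
    rw [← this]
    congr 1
    apply List.map_congr_left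
    intro j hj
    rw [htb j, if_neg (by simp at hj ⊢; omega)]
    simp
  have hmid : ((List.range (s.length - 1 - i - 1)).map (fun t =>
      (s.map (fun ch => [ch])).getD (i+1+t) [] ++ (if (2^i : Nat).testBit (i+1+t) then c else []))).flatten
      = (s.drop (i+1)).take (s.length - 1 - i - 1) := by
    have := pv_flatten_chunk s (i+1) (s.length - 1 - i - 1) (by omega)
    rw [← this]
    congr 1
    apply List.map_congr_left
    intro t ht
    rw [htb, if_neg (by simp only [decide_eq_true_eq]; omega)]
    simp
  rw [hpre, hmid, htb i, if_pos (by simp)]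
  have hgd : (s.map (fun ch => [ch])).getD i [] = [s[i]'(by omega)] := by
    rw [List.getD_eq_getElem _ _ (by simp; omega), List.getElem_map]
  rw [hgd]
  -- right side
  unfold pvWordB
  have : ((i : Int) + 1) = ((i + 1 : Nat) : Int) := by push_cast; ring
  rw [this, PySem.List.slice_to_natCast, PySem.List.slice_from_natCast]
  have hdne : s.drop (i+1) ≠ [] := by
    intro h
    have := congrArg List.length h
    simp at this
    omega
  have hdl : (s.drop (i+1)).length - 1 = s.length - 1 - i - 1 := by simp; omega
  have hlast : (s.drop (i+1)).getLast hdne = s.getLast hs := by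
    rw [List.getLast_eq_getElem, List.getLast_eq_getElem, List.getElem_drop]
    congr 1
    simp
    omega
  have hdrop : (s.drop (i+1)).take (s.length - 1 - i - 1) ++ [s.getLast hs] = s.drop (i+1) := by
    rw [← hdl, ← List.dropLast_eq_take, ← hlast, List.dropLast_append_getLast]
  have htake : List.take i s ++ [s[i]'(by omega)] = List.take (i+1) s := by
    rw [List.take_add_one, List.getElem?_eq_getElem (by omega)]
    rfl
  simp only [List.append_assoc]
  rw [hdrop, ← htake]
  simp only [List.append_assoc, List.singleton_append]

lemma pv_go_succ (sub : List Char) (f acc : Nat) (l : List Char) (hl : l ≠ []) :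
    PySem.Chars.count.go sub (f+1) l acc =
      if sub.isPrefixOf l then PySem.Chars.count.go sub f (l.drop sub.length) (acc+1)
      else PySem.Chars.count.go sub f l.tail acc := by
  cases l with
  | nil => exact absurd rfl hl
  | cons h t => rfl

lemma pv_go_ge_acc (sub : List Char) : ∀ (fuel : Nat) (l : List Char) (acc : Nat),
    acc ≤ PySem.Chars.count.go sub fuel l acc := by
  intro fuel
  induction fuel with
  | zero => intro l acc; simp [PySem.Chars.count.go]
  | succ f ih =>
    intro l acc
    cases l with
    | nil => simp [PySem.Chars.count.go]
    | cons h t =>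
      simp only [PySem.Chars.count.go]
      split
      · exact le_trans (Nat.le_succ acc) (ih _ _)
      · exact ih _ _

lemma pv_go_one (sub : List Char) (hsub : sub ≠ []) :
    ∀ (x z : List Char) (fuel acc : Nat), (x ++ (sub ++ z)).length ≤ fuel →
    acc + 1 ≤ PySem.Chars.count.go sub fuel (x ++ (sub ++ z)) acc := by
  have hs : 0 < sub.length := List.length_pos_iff.mpr hsub
  intro x
  induction x with
  | nil =>
    intro z fuel acc hf
    simp only [List.nil_append] at *
    cases fuel with
    | zero =>
      have := List.length_append (as := sub) (bs := z); omega
    | succ f =>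
      rw [pv_go_succ sub f acc _ (List.append_ne_nil_of_left_ne_nil hsub _)]
      rw [if_pos (List.isPrefixOf_iff_prefix.mpr (List.prefix_append _ _))]
      exact pv_go_ge_acc sub f _ (acc+1)
  | cons ch x ih =>
    intro z fuel acc hf
    cases fuel with
    | zero => simp [List.length_append] at hf
    | succ f =>
      rw [pv_go_succ sub f acc _ (by simp)]
      split
      · exact le_trans (by omega) (pv_go_ge_acc sub f _ (acc+1))
      · have := ih z f acc (by simp [List.length_append] at hf ⊢; omega)
        simpa using this

lemma pv_go_two (sub : List Char) (hsub : sub ≠ []) :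
    ∀ (x y z : List Char) (fuel acc : Nat), (x ++ (sub ++ (y ++ (sub ++ z)))).length ≤ fuel →
    acc + 2 ≤ PySem.Chars.count.go sub fuel (x ++ (sub ++ (y ++ (sub ++ z)))) acc := by
  have hs : 0 < sub.length := List.length_pos_iff.mpr hsub
  intro x
  induction x with
  | nil =>
    intro y z fuel acc hf
    simp only [List.nil_append] at *
    cases fuel with
    | zero =>
      have := List.length_append (as := sub) (bs := y ++ (sub ++ z)); omega
    | succ f =>
      rw [pv_go_succ sub f acc _ (List.append_ne_nil_of_left_ne_nil hsub _)]
      rw [if_pos (List.isPrefixOf_iff_prefix.mpr (List.prefix_append _ _))]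
      rw [List.drop_left]
      have := pv_go_one sub hsub y z f (acc+1) (by simp [List.length_append] at hf ⊢; omega)
      omega
  | cons ch x ih =>
    intro y z fuel acc hf
    cases fuel with
    | zero => simp [List.length_append] at hf
    | succ f =>
      rw [pv_go_succ sub f acc _ (by simp)]
      split
      · next hpre =>
        have hrw : (ch :: x ++ (sub ++ (y ++ (sub ++ z)))) = ((ch :: x ++ sub ++ y) ++ (sub ++ z)) := by
          simp
        rw [hrw, List.drop_append_of_le_length (by simp [List.length_append]; omega)]
        have := pv_go_one sub hsub ((ch :: x ++ sub ++ y).drop sub.length) z f (acc+1)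
          (by simp [List.length_append] at hf ⊢; omega)
        omega
      · have := ih y z f acc (by simp [List.length_append] at hf ⊢; omega)
        simpa using this

lemma pv_count_ge_two (c x y z : List Char) (hw : x ++ (c ++ (y ++ (c ++ z))) ≠ []) :
    2 ≤ PySem.Chars.count (x ++ (c ++ (y ++ (c ++ z)))) c := by
  by_cases hc : c = []
  · subst hc
    have h0 : 0 < (x ++ ([] ++ (y ++ ([] ++ z)))).length := List.length_pos_iff.mpr hw
    simp [PySem.Chars.count]
    simp at h0
    omega
  · simp only [PySem.Chars.count, List.isEmpty_iff, if_neg hc]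
    have := pv_go_two c hc x y z (x ++ (c ++ (y ++ (c ++ z)))).length 0 le_rfl
    omega

-- masks with two set bits below s.length-1 are always filtered out
lemma pv_multi (s c : List Char) (hs2 : 2 ≤ s.length) (m : Nat) (j k : Nat)
    (hjk : j < k) (hk : k < s.length - 1)
    (hbj : m.testBit j = true) (hbk : m.testBit k = true) :
    pvPred c (pvWordA s c (m : Int)) = false := by
  have hs : s ≠ [] := by intro h; subst h; simp at hs2
  rw [pv_wordA_eq s c hs m]
  set f : Nat → List Char := fun j =>
    (s.map (fun ch => [ch])).getD j [] ++ (if m.testBit j then c else []) with hf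
  rw [pv_flatten_split f _ j (by omega)]
  have hkidx : k = j + 1 + (k - j - 1) := by omega
  rw [pv_flatten_split (fun t => f (j+1+t)) _ (k - j - 1) (by omega)]
  have hfj : f j = (s.map (fun ch => [ch])).getD j [] ++ c := by rw [hf]; simp [hbj]
  have hfk : f (j + 1 + (k - j - 1)) = (s.map (fun ch => [ch])).getD k [] ++ c := by
    rw [hf]; simp only [← hkidx, hbk, if_pos]
  rw [hfj, hfk]
  set X := ((List.range j).map f).flatten
  set gj := (s.map (fun ch => [ch])).getD j []
  set Y := ((List.range (k - j - 1)).map fun t => f (j + 1 + t)).flatten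
  set gk := (s.map (fun ch => [ch])).getD k []
  set Z := ((List.range (s.length - 1 - j - 1 - (k - j - 1) - 1)).map
      fun t => f (j + 1 + (k - j - 1 + 1 + t))).flatten
  have h2 := pv_count_ge_two c (X ++ gj) (Y ++ gk) (Z ++ [s.getLast hs]) (by simp)
  have hshape : (X ++ gj) ++ (c ++ ((Y ++ gk) ++ (c ++ (Z ++ [s.getLast hs]))))
      = X ++ (gj ++ c) ++ (Y ++ (gk ++ c) ++ Z) ++ [s.getLast hs] := by
    simp [List.append_assoc]
  rw [hshape] at h2
  simp only [pvPred, decide_eq_false_iff_not, not_lt]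
  omega

lemma pv_main (s c : List Char) (hs2 : 2 ≤ s.length) :
    ∀ k, k ≤ s.length - 1 →
    ((PySem.List.pyRange 1 ((2:Int)^k) 1).map (pvWordA s c)).filter (pvPred c)
      = ((PySem.List.pyRange 0 (k : Int) 1).map (pvWordB s c)).filter (pvPred c) := by
  intro k
  induction k with
  | zero => simp [PySem.List.pyRange_one_eq_nil]
  | succ k ih =>
    intro hk
    have h2k : (1:Int) ≤ 2^k := one_le_pow₀ (by norm_num)
    rw [PySem.List.pyRange_one_append 1 ((2:Int)^k) ((2:Int)^(k+1)) h2k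
        (by have : (2:Int)^k ≤ 2^(k+1) := by
              apply pow_le_pow_right₀ <;> omega
            exact this)]
    rw [List.map_append, List.filter_append, ih (by omega)]
    rw [show PySem.List.pyRange ((2:Int)^k) ((2:Int)^(k+1)) 1
          = ((2:Int)^k) :: PySem.List.pyRange ((2:Int)^k + 1) ((2:Int)^(k+1)) 1 from
        PySem.List.pyRange_one_cons (by
          have : (2:Int)^k < 2^(k+1) := by
            apply pow_lt_pow_right₀ <;> omega
          exact this)]
    have hcast : ((k:Int) + 1) = ((k + 1 : Nat) : Int) := by omega
    have hrhs : PySem.List.pyRange 0 ((k+1 : Nat) : Int) 1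
        = PySem.List.pyRange 0 (k : Int) 1 ++ [(k : Int)] := by
      rw [← hcast, PySem.List.pyRange_one_succ_right (by positivity)]
    rw [← hcast] at hrhs ⊢
    rw [hrhs, List.map_append, List.filter_append]
    congr 1
    -- block [2^k, 2^(k+1)) contributes exactly the (filtered) single-gap word k
    rw [List.map_cons, List.filter_cons]
    have htail : ((PySem.List.pyRange ((2:Int)^k + 1) ((2:Int)^(k+1)) 1).map (pvWordA s c)).filter (pvPred c) = [] := by
      rw [List.filter_eq_nil_iff]
      intro w hw
      obtain ⟨n, hn, rfl⟩ := List.mem_map.mp hw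
      have hb := PySem.List.mem_pyRange_one.mp hn
      -- n has bit k set and some lower bit set
      have hn0 : 0 < n := by omega
      obtain ⟨m, rfl⟩ : ∃ m : Nat, n = (m : Int) := ⟨n.toNat, by omega⟩
      have hm1 : 2^k < m := by exact_mod_cast (by omega : ((2:Int)^k) < (m:Int))
      have hm2 : m < 2^(k+1) := by exact_mod_cast (by omega : ((m:Int)) < (2:Int)^(k+1))
      have hbk : m.testBit k = true := by
        rw [Nat.testBit, Nat.shiftRight_eq_div_pow]
        have : m / 2^k = 1 := Nat.div_eq_of_lt_le (by omega) (by
          have : 2^(k+1) = 2 * 2^k := by ring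
          omega)
        simp [this]
      have hmod : m % 2^k ≠ 0 := by
        have h2 : 2^(k+1) = 2 * 2^k := by ring
        have := Nat.mod_eq_sub_mod (a := m) (b := 2^k) (by omega)
        rw [this, Nat.mod_eq_of_lt (by omega)]
        omega
      obtain ⟨i, hi, hmax⟩ := Nat.exists_most_significant_bit hmod
      have hik : i < k := by
        by_contra hle
        have hfalse := Nat.testBit_lt_two_pow (x := m % 2^k) (i := i)
          (Nat.lt_of_lt_of_le (Nat.mod_lt _ (by positivity)) (Nat.pow_le_pow_right (by norm_num) (by omega)))
        rw [hfalse] at hi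
        exact Bool.false_ne_true hi
      have hbi : m.testBit i = true := by
        rw [Nat.testBit_mod_two_pow] at hi
        exact (Bool.and_eq_true_iff.mp hi).2
      simp only [Bool.not_eq_true]
      exact pv_multi s c hs2 m i k hik (by omega) hbi hbk
    rw [htail]
    have hsingle : pvWordA s c ((2:Int)^k) = pvWordB s c (k : Int) :=
      pv_single s c hs2 k (by omega)
    rw [hsingle]
    simp [List.filter_singleton]

lemma pv_A_eq (o c : String) :
    variate o c =
      (((PySem.List.pyRange 1
          (if ((o.toList.length : Int) - 1) < 0 then 0 else 2 ^ ((o.toList.length : Int) - 1).toNat) 1).map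
          (pvWordA o.toList c.toList)).filter (pvPred c.toList)).map String.ofList := by
  simp only [variate, PySem.List.len_eq, List.length_map,
    PySem.List.foldl_append_singleton_eq_map, List.nil_append]
  rw [PySem.List.foldl_append_ite_eq_filter]
  rfl

lemma pv_B_eq (o c : String) :
    variate_alt o c =
      (((PySem.List.pyRange 0 ((o.toList.length : Int) - 1) 1).map
          (pvWordB o.toList c.toList)).filter (pvPred c.toList)).map String.ofList := by
  simp only [variate_alt, PySem.List.len_eq]
  rw [← List.foldl_map (f := fun i => PySem.List.slice o.toList none (some (i+1)) ++ c.toList ++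
        PySem.List.slice o.toList (some (i+1)) none)
      (g := fun acc word => if PySem.Chars.count word c.toList < 2 then acc ++ [word] else acc)]
  rw [PySem.List.foldl_append_ite_eq_filter]
  rfl

lemma pv_top (o c : String) : variate o c = variate_alt o c := by
  rw [pv_A_eq, pv_B_eq]
  set s := o.toList
  by_cases hs2 : 2 ≤ s.length
  · have hcond : ¬ (((s.length : Int) - 1) < 0) := by omega
    rw [if_neg hcond]
    have htn : ((s.length : Int) - 1).toNat = s.length - 1 := by omega
    rw [htn]
    have hck : ((s.length - 1 : Nat) : Int) = (s.length : Int) - 1 := by omega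
    rw [← hck]
    rw [pv_main s c.toList hs2 (s.length - 1) le_rfl]
  · -- length 0 or 1: both sides are empty
    have h01 : s.length = 0 ∨ s.length = 1 := by omega
    rcases h01 with h | h
    · rw [if_pos (by omega), PySem.List.pyRange_one_eq_nil (by omega),
        PySem.List.pyRange_one_eq_nil (by omega)]
      simp
    · rw [if_neg (by omega)]
      have : ((s.length : Int) - 1).toNat = 0 := by omega
      rw [this, PySem.List.pyRange_one_eq_nil (by norm_num),
        PySem.List.pyRange_one_eq_nil (by omega)]
      simp

-- ===== VERDICT (by name: the statement is the Claim_ definition above) =====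
theorem variate_spec : Claim_equal_variate := by
  intro original_string char _
  unfold Spec_variate
  exact pv_top original_string char
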